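-- pv_equiv track=rewrite | github.com/pabloschwarzenberg/grader | tema2_ej2/tema2_ej2_5aec6410cf01c155a84cb9bdf8f0f4da.py | amigos
-- ===== SOURCE A (Python) =====
-- def amigos(a,b):
--     r3 = []
--     r4 = []
--     for i in range(1,a+1):
--         if a % i ==0:
--             r3.append(i)
--     for i2 in range(1,b+1):
--         if b % i2 ==0:
--             r4.append(i2)
--     if sum(r3) == sum(r4) and a != b:
--         return True
--     else:
--         return False
-- ===== SOURCE B (Python) =====
-- def sumdiv(n):
--     s = 0
--     i = 1
--     while i * i <= n:
--         if n % i == 0: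
--             s += i
--             q = n // i
--             if q != i:
--                 s += q
--         i += 1
--     return s
--
-- def amigos(a, b):
--     return sumdiv(a) == sumdiv(b) and a != b
-- ===== Notes on version B (the rewrite author's own statement) =====
-- stated objective: faster
-- what changed: Replaces the full 1..n scans collecting divisor lists with a sqrt(n)-bounded loop that adds each divisor i <= sqrt(n) together with its cofactor n//i, so the divisor sum is computed in O(sqrt(n)) without building lists.
import Mathlib
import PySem

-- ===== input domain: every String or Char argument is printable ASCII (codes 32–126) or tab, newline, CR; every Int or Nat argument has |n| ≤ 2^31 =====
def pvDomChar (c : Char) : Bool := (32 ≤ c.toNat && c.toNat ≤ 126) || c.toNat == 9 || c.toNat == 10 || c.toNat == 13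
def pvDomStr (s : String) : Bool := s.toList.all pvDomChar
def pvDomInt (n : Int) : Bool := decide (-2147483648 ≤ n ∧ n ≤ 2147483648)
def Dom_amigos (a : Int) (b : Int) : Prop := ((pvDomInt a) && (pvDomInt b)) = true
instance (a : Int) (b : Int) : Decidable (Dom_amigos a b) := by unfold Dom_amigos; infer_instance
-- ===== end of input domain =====

-- B replaces the full 1..n divisor scans by a sqrt(n)-bounded loop adding each small divisor and its cofactor (objective: faster).

-- ===== PORT A =====
def amigos (a : Int) (b : Int) : Bool :=
  let r3 := (PySem.List.pyRange 1 (a + 1) 1).foldl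
    (fun acc i => if PySem.Int.mod a i = 0 then acc ++ [i] else acc) ([] : List Int)
  let r4 := (PySem.List.pyRange 1 (b + 1) 1).foldl
    (fun acc i2 => if PySem.Int.mod b i2 = 0 then acc ++ [i2] else acc) ([] : List Int)
  if r3.sum = r4.sum ∧ a ≠ b then true else false

-- ===== PORT B =====
-- while i*i <= n: if n % i == 0: s += i; q = n // i; if q != i: s += q; i += 1
def sumdivLoop (n : Int) (i : Int) (s : Int) : Int :=
  if i * i ≤ n then
    sumdivLoop n (i + 1)
      (if PySem.Int.mod n i = 0 then
        (let q := PySem.Int.floordiv n i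
         if q ≠ i then s + i + q else s + i)
       else s)
  else s
termination_by (n + 1 - i).toNat
decreasing_by
  have hi : i ≤ n := by nlinarith [sq_nonneg (i - 1), sq_nonneg i]
  omega

def sumdiv (n : Int) : Int := sumdivLoop n 1 0

def amigos_alt (a : Int) (b : Int) : Bool := decide (sumdiv a = sumdiv b ∧ a ≠ b)

-- ===== PRECONDITION & SPEC =====
def Spec_amigos (a : Int) (b : Int) (out : Bool) : Prop := out = amigos_alt a b
instance (a : Int) (b : Int) (out : Bool) : Decidable (Spec_amigos a b out) := by unfold Spec_amigos; infer_instance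

-- ===== CLAIM (what is proved, stated in full; the proofs are below) =====
def Claim_equal_amigos : Prop := ∀ (a : Int) (b : Int), Dom_amigos a b → Spec_amigos a b (amigos a b)

-- ===== LEMMAS AND PROOFS =====

-- contribution of k to B's loop, as a function of m = n.toNat
def gdiv (m k : ℕ) : Int :=
  if k ∣ m then ((k : Int) + if m / k ≠ k then ((m / k : ℕ) : Int) else 0) else 0

-- A's filtered-range sum as a Finset sum over 1..m
lemma sumA_filter (m : ℕ) (p : Int → Bool) :
    ((PySem.List.pyRange 1 ((m : Int) + 1) 1).filter p).sum
    = ∑ k ∈ Finset.Icc 1 m, (if p (k : Int) then (k : Int) else 0) := by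
  induction m with
  | zero => simp [PySem.List.pyRange_one_eq_nil]
  | succ m ih =>
      have hcast : ((m + 1 : ℕ) : Int) + 1 = ((m : Int) + 1) + 1 := by push_cast; ring
      rw [hcast, PySem.List.pyRange_one_succ_right (by omega : (1 : Int) ≤ (m : Int) + 1),
        List.filter_append, List.sum_append, ih,
        Finset.sum_Icc_succ_top (by omega : 1 ≤ m + 1)]
      have : ((m + 1 : ℕ) : Int) = (m : Int) + 1 := by push_cast; ring
      rw [this]
      by_cases hp : p ((m : Int) + 1) <;> simp [hp]

-- A's loop: divisor-indicator sum over 1..m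
lemma sumA_eq (m : ℕ) :
    ((PySem.List.pyRange 1 ((m : Int) + 1) 1).foldl
      (fun acc i => if PySem.Int.mod (m : Int) i = 0 then acc ++ [i] else acc) ([] : List Int)).sum
    = ∑ k ∈ Finset.Icc 1 m, (if k ∣ m then (k : Int) else 0) := by
  rw [PySem.List.foldl_append_ite_eq_filter, List.nil_append, sumA_filter]
  refine Finset.sum_congr rfl (fun k hk => ?_)
  have hmk : PySem.Int.mod (m : Int) (k : Int) = ((m % k : ℕ) : Int) := PySem.Int.mod_natCast m k
  by_cases hd : k ∣ m
  · have h0 : m % k = 0 := Nat.dvd_iff_mod_eq_zero.mp hd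
    simp [hmk, h0, hd]
  · simp [hmk, Int.natCast_dvd_natCast, hd]

-- B's loop: sum of gdiv over [i, sqrt n]
lemma loop_sum (n i s : Int) : 1 ≤ i →
    sumdivLoop n i s = s + ∑ k ∈ Finset.Icc i.toNat (Nat.sqrt n.toNat), gdiv n.toNat k := by
  induction i, s using sumdivLoop.induct n with
  | case1 i s h ih =>
      intro hi
      have hn : 1 ≤ n := by nlinarith
      have hm : n = ((n.toNat : ℕ) : Int) := (Int.toNat_of_nonneg (by omega)).symm
      set m := n.toNat with hmdef
      set k := i.toNat with hkdef
      have hik : i = (k : Int) := (Int.toNat_of_nonneg (by omega)).symm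
      have hk1 : 1 ≤ k := by omega
      have hkk : k * k ≤ m := by
        have := h; rw [hm, hik] at this; exact_mod_cast this
      have hksqrt : k ≤ Nat.sqrt m := Nat.le_sqrt.mpr hkk
      rw [sumdivLoop, if_pos h]
      simp only [dite_eq_ite] at ih
      rw [ih (by omega)]
      have hsucc : (i + 1).toNat = k + 1 := by omega
      rw [hsucc]
      have hpop : ∑ j ∈ Finset.Icc k (Nat.sqrt m), gdiv m j
          = gdiv m k + ∑ j ∈ Finset.Icc (k + 1) (Nat.sqrt m), gdiv m j := by
        rw [← Finset.Ico_add_one_right_eq_Icc,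
          Finset.sum_eq_sum_Ico_succ_bot (by omega : k < Nat.sqrt m + 1),
          Finset.Ico_add_one_right_eq_Icc]
      rw [hpop]
      have hmod : PySem.Int.mod n i = ((m % k : ℕ) : Int) := by
        rw [hm, hik]; exact PySem.Int.mod_natCast m k
      have hdiv : PySem.Int.floordiv n i = ((m / k : ℕ) : Int) := by
        rw [hm, hik]; exact PySem.Int.floordiv_natCast m k
      have hbody : (if PySem.Int.mod n i = 0 then
            (let q := PySem.Int.floordiv n i
             if q ≠ i then s + i + q else s + i) else s) = s + gdiv m k := by
        rw [hmod, hdiv, hik]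
        unfold gdiv
        by_cases hd : k ∣ m
        · have h0 : ((m % k : ℕ) : Int) = 0 := by
            rw [Nat.dvd_iff_mod_eq_zero.mp hd]; rfl
          rw [if_pos h0, if_pos hd]
          by_cases hq : m / k = k
          · have heq : ((m / k : ℕ) : Int) = (k : Int) := by exact_mod_cast hq
            rw [if_neg (by simp [heq]), if_neg (by simp [hq])]
            ring
          · have hne : ((m / k : ℕ) : Int) ≠ (k : Int) := by exact_mod_cast hq
            rw [if_pos hne, if_pos hq]
            ring
        · have h0 : ((m % k : ℕ) : Int) ≠ 0 := by
            have : m % k ≠ 0 := fun h => hd (Nat.dvd_iff_mod_eq_zero.mpr h)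
            exact_mod_cast this
          rw [if_neg h0, if_neg hd, add_zero]
      rw [hbody]; ring
  | case2 i s h =>
      intro hi
      rw [sumdivLoop, if_neg h]
      have hempty : Finset.Icc i.toNat (Nat.sqrt n.toNat) = ∅ := by
        apply Finset.Icc_eq_empty
        intro hle
        by_cases hn : n ≤ 0
        · have : n.toNat = 0 := by omega
          simp [this] at hle; omega
        · have hkk : i.toNat * i.toNat ≤ n.toNat := Nat.le_sqrt.mp hle
          have : i * i ≤ n := by
            have hik : i = ((i.toNat : ℕ) : Int) := (Int.toNat_of_nonneg (by omega)).symm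
            have hnn : n = ((n.toNat : ℕ) : Int) := (Int.toNat_of_nonneg (by omega)).symm
            rw [hik, hnn]; exact_mod_cast hkk
          exact h this
      rw [hempty]; simp

-- the sqrt pairing: full divisor-indicator sum = paired sum up to sqrt m
lemma sigma_sqrt (m : ℕ) :
    ∑ k ∈ Finset.Icc 1 m, (if k ∣ m then (k : Int) else 0)
    = ∑ k ∈ Finset.Icc 1 (Nat.sqrt m), gdiv m k := by
  rcases Nat.eq_zero_or_pos m with rfl | hm
  · simp
  have hm0 : m ≠ 0 := by omega
  set r := Nat.sqrt m with hr
  -- sets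
  set D := (Finset.Icc 1 m).filter (· ∣ m) with hD
  set S := D.filter (· ≤ r) with hS
  set L := D.filter (fun k => ¬ (k ≤ r)) with hL
  set R := S.filter (fun k => m / k ≠ k) with hR
  -- LHS
  have hlhs : ∑ k ∈ Finset.Icc 1 m, (if k ∣ m then (k : Int) else 0)
      = ∑ k ∈ S, (k : Int) + ∑ k ∈ L, (k : Int) := by
    rw [← Finset.sum_filter, ← hD, ← Finset.sum_filter_add_sum_filter_not D (· ≤ r)]
  -- RHS
  have hIccr : (Finset.Icc 1 r).filter (· ∣ m) = S := by
    ext k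
    simp only [hS, hD, Finset.mem_filter, Finset.mem_Icc]
    constructor
    · rintro ⟨⟨h1, h2⟩, hd⟩
      exact ⟨⟨⟨h1, le_trans h2 (Nat.sqrt_le_self m)⟩, hd⟩, h2⟩
    · rintro ⟨⟨⟨h1, _⟩, hd⟩, h2⟩
      exact ⟨⟨h1, h2⟩, hd⟩
  have hrhs : ∑ k ∈ Finset.Icc 1 r, gdiv m k
      = ∑ k ∈ S, (k : Int) + ∑ k ∈ R, ((m / k : ℕ) : Int) := by
    unfold gdiv
    rw [← Finset.sum_filter, hIccr, Finset.sum_add_distrib]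
    congr 1
    rw [← Finset.sum_filter]
  rw [hlhs, hrhs]
  -- the bijection L ≃ R, k ↦ m / k
  congr 1
  refine Finset.sum_nbij' (i := fun d => m / d) (j := fun e => m / e) ?_ ?_ ?_ ?_ ?_
  · intro d hd
    simp only [hL, hD, Finset.mem_filter, Finset.mem_Icc, not_le] at hd
    obtain ⟨⟨⟨hd1, hdm⟩, hdvd⟩, hrd⟩ := hd
    have hd0 : 0 < d := hd1
    have hmd : m < d * d := Nat.sqrt_lt.mp hrd
    have hqlt : m / d < d := (Nat.div_lt_iff_lt_mul hd0).mpr hmd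
    have hq0 : 0 < m / d := Nat.div_pos hdm hd0
    have hqd : m / d ∣ m := Nat.div_dvd_of_dvd hdvd
    have hqmul : m / d * d = m := Nat.div_mul_cancel hdvd
    have hqsq : m / d * (m / d) ≤ m := by
      calc m / d * (m / d) ≤ m / d * d := Nat.mul_le_mul_left _ (le_of_lt hqlt)
        _ = m := hqmul
    have hqr : m / d ≤ r := Nat.le_sqrt.mpr hqsq
    have hdd : m / (m / d) = d := Nat.div_div_self hdvd hm0
    simp only [hR, hS, hD, Finset.mem_filter, Finset.mem_Icc]
    refine ⟨⟨⟨⟨hq0, Nat.le_of_dvd hm hqd⟩, hqd⟩, hqr⟩, ?_⟩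
    rw [hdd]; omega
  · intro e he
    simp only [hR, hS, hD, Finset.mem_filter, Finset.mem_Icc] at he
    obtain ⟨⟨⟨⟨he1, hem⟩, hedvd⟩, her⟩, hne⟩ := he
    have he0 : 0 < e := he1
    have hsq : e * e ≤ m := Nat.le_sqrt.mp her
    have hmul : e * (m / e) = m := Nat.mul_div_cancel' hedvd
    have hle : e ≤ m / e := by
      have : e * e ≤ e * (m / e) := by rw [hmul]; exact hsq
      exact Nat.le_of_mul_le_mul_left this he0
    have hlt : e < m / e := lt_of_le_of_ne hle (Ne.symm hne)
    have hqdvd : m / e ∣ m := Nat.div_dvd_of_dvd hedvd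
    have hq0 : 0 < m / e := Nat.div_pos hem he0
    have hrlt : r < m / e := by
      apply Nat.sqrt_lt.mpr
      calc m = e * (m / e) := hmul.symm
        _ < (m / e) * (m / e) := (Nat.mul_lt_mul_right hq0).mpr hlt
    simp only [hL, hD, Finset.mem_filter, Finset.mem_Icc, not_le]
    exact ⟨⟨⟨hq0, Nat.le_of_dvd hm hqdvd⟩, hqdvd⟩, hrlt⟩
  · intro d hd
    simp only [hL, hD, Finset.mem_filter, Finset.mem_Icc] at hd
    exact Nat.div_div_self hd.1.2 hm0
  · intro e he
    simp only [hR, hS, hD, Finset.mem_filter, Finset.mem_Icc] at he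
    exact Nat.div_div_self he.1.1.2 hm0
  · intro d hd
    simp only [hL, hD, Finset.mem_filter, Finset.mem_Icc] at hd
    rw [Nat.div_div_self hd.1.2 hm0]

-- A's list sum equals B's sumdiv, for every integer n
lemma sumdiv_eq (n : Int) :
    ((PySem.List.pyRange 1 (n + 1) 1).foldl
      (fun acc i => if PySem.Int.mod n i = 0 then acc ++ [i] else acc) ([] : List Int)).sum
    = sumdiv n := by
  unfold sumdiv
  rw [loop_sum n 1 0 (le_refl 1)]
  by_cases hn : 0 ≤ n
  · have hm : n = ((n.toNat : ℕ) : Int) := (Int.toNat_of_nonneg hn).symm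
    conv_lhs => rw [hm]
    rw [sumA_eq n.toNat, sigma_sqrt]
    simp
  · have : n + 1 ≤ 1 := by omega
    rw [PySem.List.pyRange_one_eq_nil this]
    have : n.toNat = 0 := by omega
    simp [this]

-- ===== VERDICT (by name: the statement is the Claim_ definition above) =====
theorem amigos_spec : Claim_equal_amigos := by
  intro a b _
  unfold Spec_amigos
  simp only [amigos, amigos_alt]
  rw [sumdiv_eq a, sumdiv_eq b]
  by_cases h : sumdiv a = sumdiv b ∧ a ≠ b <;> simp [h]
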